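-- pv_equiv track=rewrite | github.com/Ludong0909/PROGRAM | 111-2/PBC/hw0-5/hw5.py | find_troughs
-- ===== SOURCE A (Python) =====
-- def find_troughs (inlist, k = 2):
--     '''
--     Args:
--         inlist: list = the input list,\n
--         k: int
--
--     '''
--     out = []
--     for i in range(k,len(inlist)-k):
--             for j in range(k):
--                 if inlist[i+j-k] > inlist[i+j-k+1]:
--                     a = 1
--
--                 else:
--                     a = -1
--                     break
--
--             if a != 1:
--                 continue
--
--             for j in range(k):
--                 if inlist[i+j] < inlist[i+j+1]:
--                     a = 1
--
--                 else:
--                     a = -1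
--                     break
--
--             if a != 1:
--                 continue
--
--             out.append(i)
--     if len(out) == 0:
--         return None
--     else:
--         return out
-- ===== SOURCE B (Python) =====
-- def find_troughs(inlist, k=2):
--     # Precompute the run length of strict decrease ending at i and of
--     # strict increase starting at i, then test each index against k.
--     n = len(inlist)
--     dec = [0] * n
--     for i in range(1, n):
--         if inlist[i - 1] > inlist[i]:
--             dec[i] = dec[i - 1] + 1
--     inc = [0] * n
--     for i in range(n - 2, -1, -1):
--         if inlist[i] < inlist[i + 1]:
--             inc[i] = inc[i + 1] + 1
--     out = [i for i in range(k, n - k) if dec[i] >= k and inc[i] >= k]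
--     return out if out else None
-- ===== Notes on version B (the rewrite author's own statement) =====
-- stated objective: alternative
-- what changed: Instead of re-scanning the 2k-wide window around every index with two inner loops, B precomputes in one forward pass the strictly-decreasing run length ending at each index and in one backward pass the strictly-increasing run length starting at each index, then tests each candidate index against k; not measurably faster in practice because A's inner loops break out early on typical data.
import Mathlib
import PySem

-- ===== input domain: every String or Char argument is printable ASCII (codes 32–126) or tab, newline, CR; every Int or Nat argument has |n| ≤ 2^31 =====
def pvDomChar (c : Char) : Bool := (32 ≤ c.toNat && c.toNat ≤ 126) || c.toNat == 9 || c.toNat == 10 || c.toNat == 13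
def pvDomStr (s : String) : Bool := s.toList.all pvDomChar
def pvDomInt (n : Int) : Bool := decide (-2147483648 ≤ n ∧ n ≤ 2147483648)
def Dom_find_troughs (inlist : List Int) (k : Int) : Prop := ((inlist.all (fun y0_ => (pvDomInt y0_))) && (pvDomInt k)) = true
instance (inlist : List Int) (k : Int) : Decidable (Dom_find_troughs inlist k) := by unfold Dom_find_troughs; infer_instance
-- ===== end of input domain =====

-- B replaces A's per-index rescans of the 2k-wide window by two precomputed run-length passes (an alternative algorithm, not measured faster).

-- ===== PORT A =====
-- Python's first inner loop: `for j in range(k): if inlist[i+j-k] > inlist[i+j-k+1]: a = 1 else: a = -1; break`.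
-- Under Pre_ every index touched lies in [0, len), so `.getD 0` on pyGet? is exact there.
def pvLoop1 (l : List Int) (i k : Int) (j : Nat) : Int :=
  if h : (j : Int) < k then
    if (PySem.List.pyGet? l (i + j - k)).getD 0 > (PySem.List.pyGet? l (i + j - k + 1)).getD 0 then
      pvLoop1 l i k (j + 1)
    else -1
  else 1
termination_by (k - (j : Int)).toNat
decreasing_by omega

-- Python's second inner loop: `for j in range(k): if inlist[i+j] < inlist[i+j+1]: a = 1 else: a = -1; break`.
def pvLoop2 (l : List Int) (i k : Int) (j : Nat) : Int :=
  if h : (j : Int) < k then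
    if (PySem.List.pyGet? l (i + j)).getD 0 < (PySem.List.pyGet? l (i + j + 1)).getD 0 then
      pvLoop2 l i k (j + 1)
    else -1
  else 1
termination_by (k - (j : Int)).toNat
decreasing_by omega

def find_troughs (inlist : List Int) (k : Int) : Option (List Int) :=
  let out := (PySem.List.pyRange k ((inlist.length : Int) - k) 1).foldl
    (fun out i =>
      if pvLoop1 inlist i k 0 ≠ 1 then out
      else if pvLoop2 inlist i k 0 ≠ 1 then out
      else out ++ [i]) []
  if out.length = 0 then none else some out

-- ===== PORT B =====
-- dec[i] = length of the strictly decreasing run ending at i, built left to right.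
def pvDecFrom (prev d : Int) : List Int → List Int
  | [] => []
  | x :: xs =>
    let d' := if prev > x then d + 1 else 0
    d' :: pvDecFrom x d' xs

def pvDec : List Int → List Int
  | [] => []
  | x :: xs => 0 :: pvDecFrom x 0 xs

-- inc[i] = length of the strictly increasing run starting at i, built right to left.
def pvInc : List Int → List Int
  | [] => []
  | [_] => [0]
  | x :: y :: xs =>
    let r := pvInc (y :: xs)
    (if x < y then r.headD 0 + 1 else 0) :: r

def find_troughs_alt (inlist : List Int) (k : Int) : Option (List Int) :=
  let dec := pvDec inlist
  let inc := pvInc inlist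
  let out := (PySem.List.pyRange k ((inlist.length : Int) - k) 1).filter
    (fun i => decide (k ≤ (PySem.List.pyGet? dec i).getD 0 ∧ k ≤ (PySem.List.pyGet? inc i).getD 0))
  if out = [] then none else some out

-- ===== PRECONDITION & SPEC =====
-- Pre_ excludes exactly k ≤ 0 with a nonempty iteration range (len(inlist) > 2*k), where A raises
-- UnboundLocalError: the empty inner `for j in range(k)` never assigns `a` before `if a != 1`.
def Pre_find_troughs (inlist : List Int) (k : Int) : Prop :=
  1 ≤ k ∨ (inlist.length : Int) ≤ 2 * k

instance (inlist : List Int) (k : Int) : Decidable (Pre_find_troughs inlist k) := by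
  unfold Pre_find_troughs; infer_instance

def pvWitness_find_troughs : List Int × Int := ([3, 2, 1, 2, 3], 2)

def Spec_find_troughs (inlist : List Int) (k : Int) (out : Option (List Int)) : Prop := out = find_troughs_alt inlist k
instance (inlist : List Int) (k : Int) (out : Option (List Int)) : Decidable (Spec_find_troughs inlist k out) := by unfold Spec_find_troughs; infer_instance

-- ===== CLAIM (what is proved, stated in full; the proofs are below) =====
def Claim_equal_find_troughs : Prop := ∀ (inlist : List Int) (k : Int), Dom_find_troughs inlist k → Pre_find_troughs inlist k → Spec_find_troughs inlist k (find_troughs inlist k)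

-- ===== LEMMAS AND PROOFS =====

-- A's inner loops return 1 exactly when every remaining comparison holds.
theorem pvLoop1_char (l : List Int) (i k : Int) (j : Nat) :
    pvLoop1 l i k j = 1 ↔
      ∀ m : Nat, j ≤ m → (m : Int) < k →
        (PySem.List.pyGet? l (i + m - k)).getD 0 > (PySem.List.pyGet? l (i + m - k + 1)).getD 0 := by
  induction j using pvLoop1.induct (l := l) (i := i) (k := k) with
  | case1 j h hc ih =>
    rw [pvLoop1, dif_pos h, if_pos hc, ih]
    constructor
    · intro hall m hjm hmk
      rcases Nat.eq_or_lt_of_le hjm with rfl | hlt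
      · exact hc
      · exact hall m hlt hmk
    · intro hall m hjm hmk
      exact hall m (by omega) hmk
  | case2 j h hc =>
    rw [pvLoop1, dif_pos h, if_neg hc]
    constructor
    · intro hcontra; omega
    · intro hall
      exact absurd (hall j le_rfl h) hc
  | case3 j h =>
    rw [pvLoop1, dif_neg h]
    constructor
    · intro _ m hjm hmk
      exfalso; omega
    · intro _; rfl

theorem pvLoop2_char (l : List Int) (i k : Int) (j : Nat) :
    pvLoop2 l i k j = 1 ↔
      ∀ m : Nat, j ≤ m → (m : Int) < k →
        (PySem.List.pyGet? l (i + m)).getD 0 < (PySem.List.pyGet? l (i + m + 1)).getD 0 := by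
  induction j using pvLoop2.induct (l := l) (i := i) (k := k) with
  | case1 j h hc ih =>
    rw [pvLoop2, dif_pos h, if_pos hc, ih]
    constructor
    · intro hall m hjm hmk
      rcases Nat.eq_or_lt_of_le hjm with rfl | hlt
      · exact hc
      · exact hall m hlt hmk
    · intro hall m hjm hmk
      exact hall m (by omega) hmk
  | case2 j h hc =>
    rw [pvLoop2, dif_pos h, if_neg hc]
    constructor
    · intro hcontra; omega
    · intro hall
      exact absurd (hall j le_rfl h) hc
  | case3 j h =>
    rw [pvLoop2, dif_neg h]
    constructor
    · intro _ m hjm hmk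
      exfalso; omega
    · intro _; rfl

theorem pvDecFrom_getD_nonneg (xs : List Int) : ∀ (prev d : Int) (t : Nat), 0 ≤ d →
    0 ≤ (pvDecFrom prev d xs).getD t 0 := by
  induction xs with
  | nil => intro prev d t _; simp [pvDecFrom]
  | cons x xs ih =>
    intro prev d t hd
    cases t with
    | zero => simp [pvDecFrom]; split <;> omega
    | succ s =>
      simp only [pvDecFrom, List.getD_cons_succ]
      exact ih x _ s (by split <;> omega)

theorem pvDec_getD_nonneg (l : List Int) (t : Nat) : 0 ≤ (pvDec l).getD t 0 := by
  cases l with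
  | nil => simp [pvDec]
  | cons x xs =>
    cases t with
    | zero => simp [pvDec]
    | succ s => simpa [pvDec] using pvDecFrom_getD_nonneg xs x 0 s le_rfl

-- the recurrence dec[t+1] = dec[t]+1 if l[t] > l[t+1] else 0, read off the built list
theorem pvDecFrom_step (xs : List Int) : ∀ (prev d : Int) (t : Nat), t + 1 < xs.length →
    (pvDecFrom prev d xs).getD (t + 1) 0 =
      if xs.getD t 0 > xs.getD (t + 1) 0 then (pvDecFrom prev d xs).getD t 0 + 1 else 0 := by
  induction xs with
  | nil => intro _ _ t h; simp at h
  | cons x xs ih =>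
    intro prev d t h
    cases t with
    | zero =>
      cases xs with
      | nil => simp at h
      | cons y ys => simp [pvDecFrom]
    | succ s =>
      simp only [pvDecFrom, List.getD_cons_succ]
      exact ih x _ s (by simpa using h)

theorem pvDec_step (l : List Int) (t : Nat) (h : t + 1 < l.length) :
    (pvDec l).getD (t + 1) 0 =
      if l.getD t 0 > l.getD (t + 1) 0 then (pvDec l).getD t 0 + 1 else 0 := by
  cases l with
  | nil => simp at h
  | cons x xs =>
    cases t with
    | zero =>
      cases xs with
      | nil => simp at h
      | cons y ys => simp [pvDec, pvDecFrom]
    | succ s =>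
      simp only [pvDec, List.getD_cons_succ]
      exact pvDecFrom_step xs x 0 s (by simpa using h)

theorem forall_lt_succ_bot {κ : Nat} {P : Nat → Prop} :
    (∀ m, m < κ + 1 → P m) ↔ P 0 ∧ ∀ m, m < κ → P (m + 1) :=
  ⟨fun h => ⟨h 0 (Nat.succ_pos κ), fun m hm => h (m + 1) (by omega)⟩,
   fun ⟨h0, h⟩ m hm => match m with
     | 0 => h0
     | m + 1 => h m (by omega)⟩

-- dec[t] ≥ κ  ↔  the κ steps ending at t all strictly decrease
theorem pvDec_ge_iff (l : List Int) (κ : Nat) : ∀ (t : Nat), t < l.length →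
    ((κ : Int) ≤ (pvDec l).getD t 0 ↔
      (κ ≤ t ∧ ∀ m, m < κ → l.getD (t - m - 1) 0 > l.getD (t - m) 0)) := by
  induction κ with
  | zero =>
    intro t ht
    constructor
    · intro _; exact ⟨Nat.zero_le t, fun m hm => absurd hm (by omega)⟩
    · intro _; simpa using pvDec_getD_nonneg l t
  | succ κ ih =>
    intro t ht
    cases t with
    | zero =>
      have h0 : (pvDec l).getD 0 0 = 0 := by
        cases l with
        | nil => simp [pvDec]
        | cons x xs => simp [pvDec]
      rw [h0]
      constructor
      · intro h; exfalso; omega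
      · intro ⟨h, _⟩; omega
    | succ s =>
      rw [pvDec_step l s ht]
      split
      · rename_i hc
        constructor
        · intro h
          have hκ : (κ : Int) ≤ (pvDec l).getD s 0 := by omega
          obtain ⟨hst, hall⟩ := (ih s (by omega)).mp hκ
          refine ⟨by omega, forall_lt_succ_bot.mpr ⟨by simpa using hc, ?_⟩⟩
          intro m hm
          simpa [Nat.succ_sub_succ] using hall m hm
        · intro ⟨hst, hall⟩
          have hall' := forall_lt_succ_bot.mp hall
          have hκ : (κ : Int) ≤ (pvDec l).getD s 0 :=
            (ih s (by omega)).mpr ⟨by omega, fun m hm => by simpa [Nat.succ_sub_succ] using hall'.2 m hm⟩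
          omega
      · rename_i hc
        constructor
        · intro h; exfalso; omega
        · intro ⟨hst, hall⟩
          exact absurd (by simpa using hall 0 (by omega)) hc

theorem pvInc_getD_nonneg (l : List Int) : ∀ (t : Nat), 0 ≤ (pvInc l).getD t 0 := by
  induction l with
  | nil => intro t; simp [pvInc]
  | cons x xs ih =>
    intro t
    cases xs with
    | nil => cases t <;> simp [pvInc]
    | cons y ys =>
      cases t with
      | zero => simp only [pvInc, List.getD_cons_zero]; split <;> [skip; omega]
                have := ih 0
                cases h : pvInc (y :: ys) with
                | nil => simp
                | cons a r => simp [h] at this ⊢; omega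
      | succ s => simpa only [pvInc, List.getD_cons_succ] using ih s

-- inc[t] ≥ κ  ↔  the κ steps starting at t all strictly increase (and fit in the list)
theorem pvInc_ge_iff (l : List Int) : ∀ (κ t : Nat), t < l.length →
    ((κ : Int) ≤ (pvInc l).getD t 0 ↔
      (t + κ < l.length ∧ ∀ m, m < κ → l.getD (t + m) 0 < l.getD (t + m + 1) 0)) := by
  induction l with
  | nil => intro κ t ht; simp at ht
  | cons x xs ih =>
    intro κ t ht
    cases xs with
    | nil =>
      cases t with
      | succ s => simp at ht
      | zero =>
        constructor
        · intro h
          have hκ : κ = 0 := by simp [pvInc] at h; omega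
          subst hκ
          exact ⟨by simp, fun m hm => absurd hm (by omega)⟩
        · intro ⟨hlen, _⟩
          have hκ : κ = 0 := by simp at hlen; omega
          subst hκ
          simpa using pvInc_getD_nonneg [x] 0
    | cons y ys =>
      cases t with
      | succ s =>
        have ht' : s < (y :: ys).length := by simp at ht ⊢; omega
        simp only [pvInc, List.getD_cons_succ]
        rw [ih κ s ht']
        constructor
        · rintro ⟨h1, h2⟩
          refine ⟨by simp at h1 ⊢; omega, ?_⟩
          intro m hm
          have e1 : s + 1 + m = (s + m) + 1 := by omega
          rw [e1, List.getD_cons_succ]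
          exact h2 m hm
        · rintro ⟨h1, h2⟩
          refine ⟨by simp at h1 ⊢; omega, ?_⟩
          intro m hm
          have h := h2 m hm
          have e1 : s + 1 + m = (s + m) + 1 := by omega
          rw [e1, List.getD_cons_succ] at h
          exact h
      | zero =>
        simp only [Nat.zero_add]
        cases κ with
        | zero =>
          constructor
          · intro _; exact ⟨by simp, fun m hm => absurd hm (by omega)⟩
          · intro _; simpa using pvInc_getD_nonneg (x :: y :: ys) 0
        | succ κ =>
          have hhead : (pvInc (y :: ys)).headD 0 = (pvInc (y :: ys)).getD 0 0 := by
            cases h : pvInc (y :: ys) <;> simp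
          simp only [pvInc, List.getD_cons_zero, hhead]
          have ih0 := ih κ 0 (by simp)
          simp only [Nat.zero_add] at ih0
          split
          · rename_i hxy
            constructor
            · intro h
              have hκ : (κ : Int) ≤ (pvInc (y :: ys)).getD 0 0 := by push_cast at h ⊢; omega
              obtain ⟨h1, h2⟩ := ih0.mp hκ
              refine ⟨by simp at h1 ⊢; omega, ?_⟩
              rw [forall_lt_succ_bot]
              constructor
              · simpa using hxy
              · intro m hm
                have h := h2 m hm
                simp only [List.getD_cons_succ]
                exact h
            · rintro ⟨h1, h2⟩
              rw [forall_lt_succ_bot] at h2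
              have hκ : (κ : Int) ≤ (pvInc (y :: ys)).getD 0 0 := by
                apply ih0.mpr
                refine ⟨by simp at h1 ⊢; omega, ?_⟩
                intro m hm
                have h := h2.2 m hm
                simp only [List.getD_cons_succ] at h
                exact h
              push_cast at hκ ⊢; omega
          · rename_i hxy
            constructor
            · intro h; exfalso; push_cast at h; omega
            · rintro ⟨h1, h2⟩
              exact absurd (by simpa using h2 0 (by omega)) hxy

-- A's outer loop accumulates exactly the filtered range.
theorem foldlA_filter (l : List Int) (k : Int) : ∀ (xs acc : List Int),
    xs.foldl (fun out i =>
      if pvLoop1 l i k 0 ≠ 1 then out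
      else if pvLoop2 l i k 0 ≠ 1 then out
      else out ++ [i]) acc
    = acc ++ xs.filter (fun i => decide (pvLoop1 l i k 0 = 1 ∧ pvLoop2 l i k 0 = 1)) := by
  have hbody : (fun (out : List Int) (i : Int) =>
      if pvLoop1 l i k 0 ≠ 1 then out
      else if pvLoop2 l i k 0 ≠ 1 then out
      else out ++ [i])
      = (fun out i => if pvLoop1 l i k 0 = 1 ∧ pvLoop2 l i k 0 = 1 then out ++ [i] else out) := by
    funext out i
    by_cases h1 : pvLoop1 l i k 0 = 1 <;> by_cases h2 : pvLoop2 l i k 0 = 1 <;> simp [h1, h2]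
  intro xs acc
  rw [hbody, PySem.List.foldl_append_ite_eq_filter]

-- B's run-length test agrees with A's two window scans at every in-range index
theorem perIndex (l : List Int) (k i : Int) (hk : 1 ≤ k) (hki : k ≤ i)
    (hin : i < (l.length : Int) - k) :
    ((pvLoop1 l i k 0 = 1 ∧ pvLoop2 l i k 0 = 1) ↔
     (k ≤ (PySem.List.pyGet? (pvDec l) i).getD 0 ∧ k ≤ (PySem.List.pyGet? (pvInc l) i).getD 0)) := by
  have hti : ((i.toNat : Int)) = i := Int.toNat_of_nonneg (by omega)
  have hκ : ((k.toNat : Int)) = k := Int.toNat_of_nonneg (by omega)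
  set t := i.toNat with htdef
  set κ := k.toNat with hκdef
  have htlen : t < l.length := by omega
  have hdec : (PySem.List.pyGet? (pvDec l) i).getD 0 = (pvDec l).getD t 0 := by
    rw [← hti, PySem.List.pyGet?_natCast, List.getD_eq_getElem?_getD]
  have hinc : (PySem.List.pyGet? (pvInc l) i).getD 0 = (pvInc l).getD t 0 := by
    rw [← hti, PySem.List.pyGet?_natCast, List.getD_eq_getElem?_getD]
  rw [hdec, hinc, ← hκ, pvDec_ge_iff l κ t htlen, pvInc_ge_iff l κ t htlen]
  constructor
  · rintro ⟨hA1, hA2⟩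
    rw [pvLoop1_char] at hA1
    rw [pvLoop2_char] at hA2
    refine ⟨⟨by omega, ?_⟩, ⟨by omega, ?_⟩⟩
    · intro m hm
      have hj := hA1 (κ - 1 - m) (Nat.zero_le _) (by omega)
      have e1 : i + ((κ - 1 - m : Nat) : Int) - (κ : Int) = ((t - m - 1 : Nat) : Int) := by omega
      have e2 : ((t - m - 1 : Nat) : Int) + 1 = ((t - m : Nat) : Int) := by omega
      rw [e1, e2, PySem.List.pyGet?_natCast, PySem.List.pyGet?_natCast] at hj
      simpa [List.getD_eq_getElem?_getD] using hj
    · intro m hm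
      have hj := hA2 m (Nat.zero_le _) (by omega)
      have e1 : i + (m : Int) = ((t + m : Nat) : Int) := by omega
      have e2 : ((t + m : Nat) : Int) + 1 = ((t + m + 1 : Nat) : Int) := by omega
      rw [e1, e2, PySem.List.pyGet?_natCast, PySem.List.pyGet?_natCast] at hj
      simpa [List.getD_eq_getElem?_getD] using hj
  · rintro ⟨⟨_, hB1⟩, ⟨_, hB2⟩⟩
    constructor
    · rw [pvLoop1_char]
      intro m _ hmk
      have hm : m < κ := by omega
      have h := hB1 (κ - 1 - m) (by omega)
      have e1 : i + (m : Int) - (κ : Int) = ((t - (κ - 1 - m) - 1 : Nat) : Int) := by omega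
      have e2 : ((t - (κ - 1 - m) - 1 : Nat) : Int) + 1 = ((t - (κ - 1 - m) : Nat) : Int) := by omega
      rw [e1, e2, PySem.List.pyGet?_natCast, PySem.List.pyGet?_natCast]
      simpa [List.getD_eq_getElem?_getD] using h
    · rw [pvLoop2_char]
      intro m _ hmk
      have h := hB2 m (by omega)
      have e1 : i + (m : Int) = ((t + m : Nat) : Int) := by omega
      have e2 : ((t + m : Nat) : Int) + 1 = ((t + m + 1 : Nat) : Int) := by omega
      rw [e1, e2, PySem.List.pyGet?_natCast, PySem.List.pyGet?_natCast]
      simpa [List.getD_eq_getElem?_getD] using h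

-- ===== VERDICT (by name: the statement is the Claim_ definition above) =====
theorem find_troughs_spec : Claim_equal_find_troughs := by
  intro inlist k _hdom hpre
  unfold Spec_find_troughs find_troughs find_troughs_alt
  rw [foldlA_filter, List.nil_append]
  have hfilter :
      (PySem.List.pyRange k ((inlist.length : Int) - k) 1).filter
        (fun i => decide (pvLoop1 inlist i k 0 = 1 ∧ pvLoop2 inlist i k 0 = 1))
      = (PySem.List.pyRange k ((inlist.length : Int) - k) 1).filter
        (fun i => decide (k ≤ (PySem.List.pyGet? (pvDec inlist) i).getD 0 ∧
                          k ≤ (PySem.List.pyGet? (pvInc inlist) i).getD 0)) := by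
    apply List.filter_congr
    intro i hi
    obtain ⟨hki, hin⟩ := PySem.List.mem_pyRange_one.mp hi
    have hk : 1 ≤ k := by
      rcases hpre with h | h
      · exact h
      · omega
    rw [decide_eq_decide]
    exact perIndex inlist k i hk hki hin
  rw [hfilter]
  simp [List.length_eq_zero_iff]
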